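-- pv_equiv track=rewrite | github.com/vllm-project/vllm | examples/suffix_decoding_minimal.py | _find_matches_with_next_tokens
-- ===== SOURCE A (Python) =====
-- from collections.abc import Iterable, Sequence
--
-- def _find_matches_with_next_tokens(
--     context: Sequence[str], pattern: Sequence[str]
-- ) -> list[str]:
--     """
--     Find all positions where 'pattern' appears in 'context', and collect
--     the token that follows that occurrence (if any).
--     Returns the list of "next tokens" that followed each match.
--     """
--     next_tokens: list[str] = []
--     n = len(context)
--     m = len(pattern)
--     if m == 0 or n == 0 or m > n:
--         return next_tokens
--     for i in range(n - m + 1):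
--         if context[i : i + m] == list(pattern) and i + m < n:
--             next_tokens.append(context[i + m])
--     return next_tokens
-- ===== SOURCE B (Python) =====
-- def _find_matches_with_next_tokens(context, pattern):
--     # Transposed ("column-wise") matching: keep a boolean table 'alive' over
--     # candidate start positions and prune it one pattern token at a time,
--     # then collect the token following each surviving start.
--     n, m = len(context), len(pattern)
--     if m == 0 or n <= m:
--         return []
--     width = n - m  # only starts whose match is followed by one more token
--     alive = [True] * width
--     for k in range(m):
--         p = pattern[k]
--         for i in range(width):
--             alive[i] = alive[i] and context[i + k] == p
--     return [context[i + m] for i in range(width) if alive[i]]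
-- ===== Notes on version B (the rewrite author's own statement) =====
-- stated objective: alternative
-- what changed: Replaced the per-position slice comparison with a transposed scan: a boolean table over all candidate start positions is pruned one pattern token at a time, and the token following each surviving start is collected in a final pass.
import Mathlib
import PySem

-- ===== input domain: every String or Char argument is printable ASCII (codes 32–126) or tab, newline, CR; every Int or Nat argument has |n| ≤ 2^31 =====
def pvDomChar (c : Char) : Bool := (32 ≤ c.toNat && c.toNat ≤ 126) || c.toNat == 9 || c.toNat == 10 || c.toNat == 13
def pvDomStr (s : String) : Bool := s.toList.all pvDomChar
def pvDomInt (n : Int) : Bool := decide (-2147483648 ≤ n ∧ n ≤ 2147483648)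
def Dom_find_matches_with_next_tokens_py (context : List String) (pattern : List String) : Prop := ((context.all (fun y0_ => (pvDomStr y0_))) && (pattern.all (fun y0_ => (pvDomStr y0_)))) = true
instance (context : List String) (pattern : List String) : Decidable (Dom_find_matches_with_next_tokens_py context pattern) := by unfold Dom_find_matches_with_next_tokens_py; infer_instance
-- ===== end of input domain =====

-- B replaces the position-by-position slice comparison with a transposed scan: a boolean
-- table over candidate start positions is pruned one pattern token at a time, then the
-- token after each surviving start is collected (objective: alternative; same O(n·m) cost).

-- ===== PORT A =====
def find_matches_with_next_tokens_py (context : List String) (pattern : List String) : List String :=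
  let next_tokens : List String := []
  let n : Int := context.length
  let m : Int := pattern.length
  if m = 0 ∨ n = 0 ∨ m > n then next_tokens
  else
    (PySem.List.pyRange 0 (n - m + 1) 1).foldl
      (fun acc i =>
        if PySem.List.slice context (some i) (some (i + m)) = pattern ∧ i + m < n then
          acc ++ [PySem.List.pyGetD context (i + m) ""]
        else acc)
      next_tokens

-- ===== PORT B =====
def find_matches_with_next_tokens_py_alt (context : List String) (pattern : List String) : List String :=
  let n := context.length
  let m := pattern.length
  if m = 0 ∨ n ≤ m then []
  else
    let width := n - m
    let alive :=
      (List.range m).foldl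
        (fun al k =>
          let p := pattern.getD k ""
          (List.range width).foldl
            (fun al i => al.set i (al.getD i false && (context.getD (i + k) "" == p))) al)
        (List.replicate width true)
    (List.range width).filterMap
      (fun i => if alive.getD i false then some (context.getD (i + m) "") else none)

-- ===== PRECONDITION & SPEC =====
def Spec_find_matches_with_next_tokens_py (context : List String) (pattern : List String) (out : List String) : Prop := out = find_matches_with_next_tokens_py_alt context pattern
instance (context : List String) (pattern : List String) (out : List String) : Decidable (Spec_find_matches_with_next_tokens_py context pattern out) := by unfold Spec_find_matches_with_next_tokens_py; infer_instance

-- ===== CLAIM (what is proved, stated in full; the proofs are below) =====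
def Claim_equal_find_matches_with_next_tokens_py : Prop := ∀ (context : List String) (pattern : List String), Dom_find_matches_with_next_tokens_py context pattern → Spec_find_matches_with_next_tokens_py context pattern (find_matches_with_next_tokens_py context pattern)

-- ===== LEMMAS AND PROOFS =====

-- Does pattern match context at start position i (all pattern.length tokens agree)?
def pvMatchAt (context pattern : List String) (i : Nat) : Bool :=
  (List.range pattern.length).all (fun k => context.getD (i + k) "" == pattern.getD k "")

-- the common closed form both ports are reduced to
def pvClosed (context pattern : List String) : List String :=
  ((List.range (context.length - pattern.length)).filter (pvMatchAt context pattern)).map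
    (fun i => context.getD (i + pattern.length) "")

-- B's inner loop (one pruning pass) preserves the table length
theorem pv_inner_length (f : Nat → Bool) (ixs : List Nat) (al : List Bool) :
    (ixs.foldl (fun a i => a.set i (a.getD i false && f i)) al).length = al.length := by
  induction ixs generalizing al with
  | nil => rfl
  | cons x xs ih => rw [List.foldl_cons, ih, List.length_set]

-- element j of the table after one pruning pass over indices s, s+1, …, s+c-1
theorem pv_inner_getD (f : Nat → Bool) (c : Nat) : ∀ (s : Nat) (al : List Bool) (j : Nat),
    ((List.range' s c).foldl (fun a i => a.set i (a.getD i false && f i)) al).getD j false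
      = if s ≤ j ∧ j < s + c ∧ j < al.length then al.getD j false && f j else al.getD j false := by
  induction c with
  | zero =>
    intro s al j
    rw [show List.range' s 0 = [] from rfl, List.foldl_nil, if_neg (by omega)]
  | succ c ih =>
    intro s al j
    rw [List.range'_succ, List.foldl_cons, ih]
    simp only [List.length_set, List.getD, List.getElem?_set]
    by_cases hsj : s = j
    · subst hsj
      by_cases hl : s < al.length
      · rw [if_neg (show ¬(s + 1 ≤ s ∧ s < s + 1 + c ∧ s < al.length) by omega),
           if_pos (show s ≤ s ∧ s < s + (c + 1) ∧ s < al.length by omega)]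
        simp [hl]
      · rw [if_neg (show ¬(s + 1 ≤ s ∧ s < s + 1 + c ∧ s < al.length) by omega),
           if_neg (show ¬(s ≤ s ∧ s < s + (c + 1) ∧ s < al.length) by omega),
           if_pos rfl, if_neg hl, List.getElem?_eq_none (show al.length ≤ s by omega)]
    · simp only [if_neg hsj]
      split_ifs with h1 h2
      · rfl
      · exact absurd (by omega : s ≤ j ∧ j < s + (c + 1) ∧ j < al.length) h2
      · exact absurd (by omega : s + 1 ≤ j ∧ j < s + 1 + c ∧ j < al.length) h1
      · rfl

-- the same pass, phrased over List.range
theorem pv_inner_getD_range (f : Nat → Bool) (w : Nat) (al : List Bool) (j : Nat) :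
    ((List.range w).foldl (fun a i => a.set i (a.getD i false && f i)) al).getD j false
      = if j < w ∧ j < al.length then al.getD j false && f j else al.getD j false := by
  rw [List.range_eq_range', pv_inner_getD]
  split_ifs with h1 h2
  · rfl
  · exact absurd (by omega : j < w ∧ j < al.length) h2
  · exact absurd (by omega : 0 ≤ j ∧ j < 0 + w ∧ j < al.length) h1
  · rfl

-- the pruned table keeps length width
theorem pv_alive_length (context pattern : List String) (width K : Nat) :
    (((List.range K).foldl
        (fun al k =>
          let p := pattern.getD k ""
          (List.range width).foldl
            (fun al i => al.set i (al.getD i false && (context.getD (i + k) "" == p))) al)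
        (List.replicate width true))).length = width := by
  induction K with
  | zero => simp
  | succ K ih =>
    rw [List.range_succ, List.foldl_append, List.foldl_cons, List.foldl_nil, pv_inner_length]
    exact ih

-- the pruned table after the first K pattern tokens, element-wise
theorem pv_alive_getD (context pattern : List String) (width : Nat) (K : Nat) (j : Nat) :
    (((List.range K).foldl
        (fun al k =>
          let p := pattern.getD k ""
          (List.range width).foldl
            (fun al i => al.set i (al.getD i false && (context.getD (i + k) "" == p))) al)
        (List.replicate width true)).getD j false)
      = if j < width then (List.range K).all (fun k => context.getD (j + k) "" == pattern.getD k "") else false := by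
  induction K with
  | zero =>
    simp only [List.range_zero, List.foldl_nil, List.all_nil]
    by_cases h : j < width <;> simp [List.getD, h]
  | succ K ih =>
    rw [List.range_succ, List.foldl_append, List.foldl_cons, List.foldl_nil]
    simp only []
    rw [pv_inner_getD_range, pv_alive_length, ih]
    by_cases h : j < width
    · simp [h, List.all_append]
    · simp [h]

-- A's guarded slice test agrees with pvMatchAt on in-range starts
theorem pv_slice_eq_iff (context pattern : List String) (k : Nat)
    (h : k + pattern.length ≤ context.length) :
    ((context.drop k).take pattern.length = pattern) ↔ pvMatchAt context pattern k = true := by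
  unfold pvMatchAt
  constructor
  · intro he
    simp only [List.all_eq_true, List.mem_range]
    intro j hj
    have : pattern.getD j "" = ((context.drop k).take pattern.length).getD j "" := by rw [he]
    rw [this]
    have h1 : j < ((context.drop k).take pattern.length).length := by
      simp [List.length_take, List.length_drop]; omega
    have h2 : k + j < context.length := by omega
    rw [List.getD_eq_getElem _ _ h1, List.getD_eq_getElem _ _ h2]
    simp [List.getElem_take, List.getElem_drop]
  · intro ha
    have hl : ((context.drop k).take pattern.length).length = pattern.length := by
      simp [List.length_take, List.length_drop]; omega
    apply List.ext_getElem hl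
    intro j hj1 hj2
    simp only [List.all_eq_true, List.mem_range] at ha
    have := ha j hj2
    rw [beq_iff_eq] at this
    have h2 : k + j < context.length := by omega
    rw [List.getD_eq_getElem _ _ h2, List.getD_eq_getElem _ _ hj2] at this
    simpa [List.getElem_take, List.getElem_drop] using this

-- comprehension shape: filterMap of an if-some-none is filter-then-map
theorem pv_filterMap_if (l : List Nat) (c : Nat → Bool) (g : Nat → String) :
    l.filterMap (fun i => if c i then some (g i) else none) = (l.filter c).map g := by
  induction l with
  | nil => rfl
  | cons x xs ih => by_cases h : c x <;> simp [h, ih]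

-- B equals the closed form (for nonempty pattern; if the pattern is longer than the
-- context the range is empty and both sides are [])
theorem pv_alt_closed (context pattern : List String) (hm : 1 ≤ pattern.length) :
    find_matches_with_next_tokens_py_alt context pattern = pvClosed context pattern := by
  simp only [find_matches_with_next_tokens_py_alt, pvClosed]
  by_cases h : context.length ≤ pattern.length
  · have hw : context.length - pattern.length = 0 := by omega
    rw [if_pos (Or.inr h)]
    simp [hw]
  · rw [if_neg (by omega)]
    rw [List.filterMap_congr (g := fun i => if pvMatchAt context pattern i then some (context.getD (i + pattern.length) "") else none) ?_]
    · exact pv_filterMap_if _ _ _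
    · intro i hi
      rw [pv_alive_getD]
      simp only [List.mem_range] at hi
      simp [hi, pvMatchAt]

-- A equals the same closed form (for nonempty pattern)
theorem pv_a_closed (context pattern : List String) (hm : 1 ≤ pattern.length) :
    find_matches_with_next_tokens_py context pattern = pvClosed context pattern := by
  simp only [find_matches_with_next_tokens_py, pvClosed]
  by_cases hgt : context.length < pattern.length
  · rw [if_pos (by right; right; exact_mod_cast Int.ofNat_lt.mpr hgt)]
    have hw : context.length - pattern.length = 0 := by omega
    simp [hw]
  · have hmn : pattern.length ≤ context.length := by omega
    rw [if_neg (by omega)]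
    have hb : ((context.length : Int) - (pattern.length : Int) + 1)
        = ((context.length - pattern.length + 1 : Nat) : Int) := by push_cast; omega
    rw [hb, PySem.List.pyRange_one, List.foldl_map]
    have hfun : (fun (acc : List String) (k : Nat) =>
        if PySem.List.slice context (some ((0 : Int) + (k : Int))) (some ((0 : Int) + (k : Int) + (pattern.length : Int))) = pattern ∧ (0 : Int) + (k : Int) + (pattern.length : Int) < (context.length : Int) then
          acc ++ [PySem.List.pyGetD context ((0 : Int) + (k : Int) + (pattern.length : Int)) ""]
        else acc)
        = (fun (acc : List String) (k : Nat) =>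
        if (decide (PySem.List.slice context (some ((k : Int))) (some ((k : Int) + (pattern.length : Int))) = pattern) && decide (((k : Int) + (pattern.length : Int)) < (context.length : Int))) then
          acc ++ [context.getD (k + pattern.length) ""]
        else acc) := by
      funext acc k
      have hg : PySem.List.pyGetD context ((k : Int) + (pattern.length : Int)) ""
          = context.getD (k + pattern.length) "" := by
        rw [show ((k : Int) + (pattern.length : Int)) = ((k + pattern.length : Nat) : Int) by push_cast; ring]
        exact PySem.List.pyGetD_natCast context _ ""
      simp only [zero_add, hg, Bool.and_eq_true, decide_eq_true_eq]
    rw [hfun, PySem.List.foldl_append_if]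
    have hsub : (((context.length - pattern.length + 1 : Nat) : Int) - 0).toNat
        = context.length - pattern.length + 1 := by omega
    rw [hsub, List.nil_append, List.range_succ, List.filter_append]
    have hlast : (List.filter (fun (k : Nat) => decide (PySem.List.slice context (some ((k : Int))) (some ((k : Int) + (pattern.length : Int))) = pattern) && decide (((k : Int) + (pattern.length : Int)) < (context.length : Int))) ([context.length - pattern.length] : List Nat)) = [] := by
      simp only [List.filter_cons, List.filter_nil]
      rw [if_neg]
      simp only [Bool.and_eq_true, decide_eq_true_eq, not_and]
      intro _
      omega
    rw [hlast, List.append_nil]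
    rw [List.filter_congr (q := pvMatchAt context pattern) ?_]
    · intro k hk
      simp only [List.mem_range] at hk
      have hkm : k + pattern.length <= context.length := by omega
      rw [PySem.List.slice_natCast_add]
      have ht : decide (((k : Int) + (pattern.length : Int)) < (context.length : Int)) = true :=
        decide_eq_true (by omega)
      rw [ht, Bool.and_true]
      by_cases hq : pvMatchAt context pattern k = true
      · rw [hq]
        exact decide_eq_true ((pv_slice_eq_iff context pattern k hkm).mpr hq)
      · rw [Bool.not_eq_true] at hq
        rw [hq]
        exact decide_eq_false (by
          intro hc
          have h2 := (pv_slice_eq_iff context pattern k hkm).mp hc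
          rw [hq] at h2
          exact Bool.false_ne_true h2)

-- ===== VERDICT (by name: the statement is the Claim_ definition above) =====
theorem find_matches_with_next_tokens_py_spec : Claim_equal_find_matches_with_next_tokens_py := by
  intro context pattern _hdom
  unfold Spec_find_matches_with_next_tokens_py
  by_cases hm : pattern.length = 0
  · have : pattern = [] := List.eq_nil_of_length_eq_zero hm
    subst this
    simp [find_matches_with_next_tokens_py, find_matches_with_next_tokens_py_alt]
  · rw [pv_a_closed context pattern (by omega), pv_alt_closed context pattern (by omega)]
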